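-- pv_equiv track=rewrite | github.com/LocatedInSpace/procrastination-project | data-processing/split-into-sessions.py | split_sessions
-- ===== SOURCE A (Python) =====
-- def split_sessions(data, threshold=60):
-- 	"""Splits data into sessions based on a time threshold."""
-- 	sessions = []
-- 	current_session = []
-- 	previous_time = None
--
-- 	for record in data:
-- 		received_time = record["received_at"]
--
-- 		if previous_time is None or received_time - previous_time <= threshold:
-- 			current_session.append(record)
-- 		else:
-- 			sessions.append(current_session[:])
-- 			current_session = [record]
--
-- 		previous_time = received_time
--
-- 	if current_session:
-- 		sessions.append(current_session)
--
-- 	return sessions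
-- ===== SOURCE B (Python) =====
-- def split_sessions(data, threshold=60):
--     """Splits data into sessions based on a time threshold."""
--     records = list(data)
--     sessions = []
--     i, n = 0, len(records)
--     while i < n:
--         j = i + 1
--         while j < n and records[j]["received_at"] - records[j - 1]["received_at"] <= threshold:
--             j += 1
--         sessions.append(records[i:j])
--         i = j
--     return sessions
-- ===== Notes on version B (the rewrite author's own statement) =====
-- stated objective: alternative
-- what changed: A is a single accumulator loop carrying (sessions, current_session, previous_time) state; B is a two-level scan: an outer loop that, for each session start, advances an inner pointer while the gap stays within threshold and emits one slice per session, with no accumulated session buffer or previous-time variable.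
import Mathlib
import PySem

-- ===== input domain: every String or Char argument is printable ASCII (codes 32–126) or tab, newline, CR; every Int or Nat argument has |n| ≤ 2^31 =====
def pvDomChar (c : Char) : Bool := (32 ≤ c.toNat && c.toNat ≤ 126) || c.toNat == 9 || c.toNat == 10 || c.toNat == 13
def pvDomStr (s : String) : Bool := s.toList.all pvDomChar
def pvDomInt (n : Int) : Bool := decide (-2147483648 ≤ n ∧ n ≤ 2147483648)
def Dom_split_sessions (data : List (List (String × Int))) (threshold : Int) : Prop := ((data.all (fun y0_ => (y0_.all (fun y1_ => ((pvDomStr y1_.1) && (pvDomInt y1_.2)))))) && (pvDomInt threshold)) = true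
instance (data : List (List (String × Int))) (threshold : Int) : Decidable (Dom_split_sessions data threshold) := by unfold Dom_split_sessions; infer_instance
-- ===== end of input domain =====

-- B replaces A's single accumulator loop (sessions/current_session/previous_time state) with a
-- two-level scan emitting one slice per session; same values, no speed claim (objective: alternative).


-- record["received_at"]; the default 0 is never hit under Pre_split_sessions (key present)
def pvRA (r : List (String × Int)) : Int := (PySem.Dict.mk r).getD "received_at" 0

-- ===== PORT A =====
-- loop body: state = (sessions, current_session, previous_time)
def pvStep (threshold : Int)
    (st : List (List (List (String × Int))) × List (List (String × Int)) × Option Int)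
    (record : List (String × Int)) :
    List (List (List (String × Int))) × List (List (String × Int)) × Option Int :=
  let received := pvRA record
  match st.2.2 with
  | none => (st.1, st.2.1 ++ [record], some received)
  | some p =>
    if received - p ≤ threshold then (st.1, st.2.1 ++ [record], some received)
    else (st.1 ++ [st.2.1], [record], some received)

-- 'if current_session: sessions.append(current_session)'
def pvFinal (st : List (List (List (String × Int))) × List (List (String × Int)) × Option Int) :
    List (List (List (String × Int))) :=
  if st.2.1 ≠ [] then st.1 ++ [st.2.1] else st.1

def split_sessions (data : List (List (String × Int))) (threshold : Int) : List (List (List (String × Int))) :=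
  pvFinal (data.foldl (pvStep threshold) ([], [], none))

-- ===== PORT B =====
-- inner while loop: extend the current session while the gap stays ≤ threshold;
-- returns (rest of current session, remaining records)
def altTake (threshold prev : Int) :
    List (List (String × Int)) → List (List (String × Int)) × List (List (String × Int))
  | [] => ([], [])
  | r :: rest =>
    if pvRA r - prev ≤ threshold then
      let p := altTake threshold (pvRA r) rest
      (r :: p.1, p.2)
    else ([], r :: rest)

theorem altTake_snd_length (threshold prev : Int) :
    ∀ xs : List (List (String × Int)), (altTake threshold prev xs).2.length ≤ xs.length := by
  intro xs
  induction xs generalizing prev with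
  | nil => simp [altTake]
  | cons r rest ih =>
    simp only [altTake]
    split
    · exact Nat.le_succ_of_le (ih _)
    · exact Nat.le_refl _

-- outer while loop: one slice per session
def altGo (threshold : Int) : List (List (String × Int)) → List (List (List (String × Int)))
  | [] => []
  | r :: rest =>
    let p := altTake threshold (pvRA r) rest
    (r :: p.1) :: altGo threshold p.2
termination_by xs => xs.length
decreasing_by
  simpa using Nat.lt_succ_of_le (altTake_snd_length threshold (pvRA r) rest)

def split_sessions_alt (data : List (List (String × Int))) (threshold : Int) : List (List (List (String × Int))) :=
  altGo threshold data

-- ===== PRECONDITION & SPEC =====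
-- Pre_ excludes exactly the inputs where a record lacks the "received_at" key, on which A raises KeyError.
def Pre_split_sessions (data : List (List (String × Int))) (threshold : Int) : Prop :=
  ∀ r ∈ data, (PySem.Dict.mk r).contains "received_at" = true
instance (data : List (List (String × Int))) (threshold : Int) : Decidable (Pre_split_sessions data threshold) := by unfold Pre_split_sessions; infer_instance

def pvWitness_split_sessions : (List (List (String × Int))) × Int :=
  ([[("received_at", 0)], [("received_at", 50)], [("received_at", 200)]], 60)

def Spec_split_sessions (data : List (List (String × Int))) (threshold : Int) (out : List (List (List (String × Int)))) : Prop := out = split_sessions_alt data threshold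
instance (data : List (List (String × Int))) (threshold : Int) (out : List (List (List (String × Int)))) : Decidable (Spec_split_sessions data threshold out) := by unfold Spec_split_sessions; infer_instance

-- ===== CLAIM (what is proved, stated in full; the proofs are below) =====
def Claim_equal_split_sessions : Prop := ∀ (data : List (List (String × Int))) (threshold : Int), Dom_split_sessions data threshold → Pre_split_sessions data threshold → Spec_split_sessions data threshold (split_sessions data threshold)

-- ===== LEMMAS AND PROOFS =====

-- loop invariant: running A's fold from a nonempty current session whose last time is p
-- produces the already-emitted sessions followed by what B's two-level scan produces
theorem loop_eq (threshold : Int) :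
    ∀ (xs : List (List (String × Int))) (sessions : List (List (List (String × Int))))
      (cur : List (List (String × Int))) (p : Int), cur ≠ [] →
    pvFinal (xs.foldl (pvStep threshold) (sessions, cur, some p)) =
      sessions ++ ((cur ++ (altTake threshold p xs).1) :: altGo threshold (altTake threshold p xs).2) := by
  intro xs
  induction xs with
  | nil =>
    intro sessions cur p hcur
    simp [pvFinal, altTake, altGo, hcur]
  | cons r rest ih =>
    intro sessions cur p hcur
    by_cases h : pvRA r - p ≤ threshold
    · have hstep : pvStep threshold (sessions, cur, some p) r =
        (sessions, cur ++ [r], some (pvRA r)) := by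
        simp [pvStep, h]
      rw [List.foldl_cons, hstep, ih sessions (cur ++ [r]) (pvRA r) (by simp), altTake]
      simp [h]
    · have hstep : pvStep threshold (sessions, cur, some p) r =
        (sessions ++ [cur], [r], some (pvRA r)) := by
        simp [pvStep, h]
      rw [List.foldl_cons, hstep, ih (sessions ++ [cur]) [r] (pvRA r) (by simp), altTake]
      simp only [if_neg h]
      rw [altGo]
      simp

-- ===== VERDICT (by name: the statement is the Claim_ definition above) =====
theorem split_sessions_spec : Claim_equal_split_sessions := by
  intro data threshold _ _
  unfold Spec_split_sessions split_sessions split_sessions_alt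
  cases data with
  | nil => simp [pvFinal, altGo]
  | cons r rest =>
    have hstep : pvStep threshold ([], [], none) r = ([], [r], some (pvRA r)) := by
      simp [pvStep]
    rw [List.foldl_cons, hstep, loop_eq threshold rest [] [r] (pvRA r) (by simp), altGo]
    simp
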